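-- pv_equiv track=rewrite | github.com/pyccel/pyccel | tests/complexity/scripts/ex1.py | double_loop
-- ===== SOURCE A (Python) =====
-- def double_loop( n: 'int' ):
--     x = 0
--     for i in range( 3, 10 ): # pylint: disable=unused-variable
--         x += 1
--         y  = n*x
--         for j in range( 4, 15 ): # pylint: disable=unused-variable
--             z = x-y
--     return z
-- ===== SOURCE B (Python) =====
-- def double_loop(n):
--     # closed form: outer loop runs 7 times so x ends at 7, y = 7*n,
--     # and z (set on the last inner iteration) is x - y = 7 - 7*n
--     return 7 - 7 * n
-- ===== Notes on version B (the rewrite author's own statement) =====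
-- stated objective: simpler
-- what changed: Replaced the fixed nested loops by the closed-form expression 7 - 7*n (x ends at 7, y = 7*n, z = x - y).
import Mathlib
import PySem

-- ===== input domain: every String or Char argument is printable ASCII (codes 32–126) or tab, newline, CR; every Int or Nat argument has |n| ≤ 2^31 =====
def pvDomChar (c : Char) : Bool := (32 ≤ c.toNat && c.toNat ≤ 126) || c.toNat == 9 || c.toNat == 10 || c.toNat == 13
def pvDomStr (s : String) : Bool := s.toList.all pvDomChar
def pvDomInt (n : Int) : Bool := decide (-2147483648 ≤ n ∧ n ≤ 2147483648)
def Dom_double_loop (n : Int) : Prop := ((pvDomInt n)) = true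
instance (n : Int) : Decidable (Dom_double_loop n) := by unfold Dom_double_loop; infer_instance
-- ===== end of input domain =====

-- B replaces A's fixed nested loops by the closed form 7 - 7*n (same value, fewer steps).
-- ===== PORT A =====
-- literal port of A: outer fold over range(3,10) carrying (x, z); inner fold over
-- range(4,15) repeatedly setting z := x - y. z starts at 0 (Python leaves it unbound,
-- but both loops always run, so the initial value is never returned).
def double_loop (n : Int) : Int :=
  let st := (PySem.List.pyRange 3 10 1).foldl (fun (xz : Int × Int) _ =>
    let x := xz.1 + 1
    let y := n * x
    let z := (PySem.List.pyRange 4 15 1).foldl (fun _ _ => x - y) xz.2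
    (x, z)) (0, 0)
  st.2

-- ===== PORT B =====
def double_loop_alt (n : Int) : Int := 7 - 7 * n

-- ===== PRECONDITION & SPEC =====
def Spec_double_loop (n : Int) (out : Int) : Prop := out = double_loop_alt n
instance (n : Int) (out : Int) : Decidable (Spec_double_loop n out) := by unfold Spec_double_loop; infer_instance

-- ===== CLAIM (what is proved, stated in full; the proofs are below) =====
def Claim_equal_double_loop : Prop := ∀ (n : Int), Dom_double_loop n → Spec_double_loop n (double_loop n)

-- ===== LEMMAS AND PROOFS =====

-- ===== VERDICT (by name: the statement is the Claim_ definition above) =====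
theorem double_loop_spec : Claim_equal_double_loop := by
  intro n _
  show double_loop n = double_loop_alt n
  have h1 : PySem.List.pyRange 3 10 1 = [3,4,5,6,7,8,9] := by decide
  have h2 : PySem.List.pyRange 4 15 1 = [4,5,6,7,8,9,10,11,12,13,14] := by decide
  simp only [double_loop, double_loop_alt, h1, h2, List.foldl]
  ring
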